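-- pv_equiv track=rewrite | github.com/adeelshah110/ACI-Rank_python | ACIRank_new.py | Clean_NoSyn
-- ===== SOURCE A (Python) =====
-- def Clean_NoSyn(No_syn):
--     Words =[]
--     for x in No_syn:
--         x = x.strip('.').strip(':').strip('?').strip('/').strip("'").strip ("©").strip("»").strip("/").strip(" ").strip(",")
--         for n in x.split('.'):
--             for k in n.split('-'):
--                 for m in k.split('/'):
--                     if m not in ["©","»","/"," "] and len(m)>1 and m.isalpha():
--                         Words.append(m)
--     return (Words)
-- ===== SOURCE B (Python) =====
-- def Clean_NoSyn(No_syn):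
--     # Same result as the nested split('.')/split('-')/split('/') version, but with a
--     # single character-level scan per string: fragments are accumulated and flushed
--     # at any of the three separator characters.
--     Words = []
--     for x in No_syn:
--         x = x.strip('.').strip(':').strip('?').strip('/').strip("'").strip("©").strip("»").strip("/").strip(" ").strip(",")
--         cur = ""
--         for ch in x:
--             if ch == '.' or ch == '-' or ch == '/':
--                 if len(cur) > 1 and cur.isalpha():
--                     Words.append(cur)
--                 cur = ""
--             else:
--                 cur = cur + ch
--         if len(cur) > 1 and cur.isalpha():
--             Words.append(cur)
--     return Words
-- ===== Notes on version B (the rewrite author's own statement) =====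
-- stated objective: alternative
-- what changed: The three nested split('.')/split('-')/split('/') loops are replaced by a single character-level scan that accumulates a fragment and flushes it at any of the three separators; the redundant membership test against four one-character strings (already excluded by len>1) is dropped.
import Mathlib
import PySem

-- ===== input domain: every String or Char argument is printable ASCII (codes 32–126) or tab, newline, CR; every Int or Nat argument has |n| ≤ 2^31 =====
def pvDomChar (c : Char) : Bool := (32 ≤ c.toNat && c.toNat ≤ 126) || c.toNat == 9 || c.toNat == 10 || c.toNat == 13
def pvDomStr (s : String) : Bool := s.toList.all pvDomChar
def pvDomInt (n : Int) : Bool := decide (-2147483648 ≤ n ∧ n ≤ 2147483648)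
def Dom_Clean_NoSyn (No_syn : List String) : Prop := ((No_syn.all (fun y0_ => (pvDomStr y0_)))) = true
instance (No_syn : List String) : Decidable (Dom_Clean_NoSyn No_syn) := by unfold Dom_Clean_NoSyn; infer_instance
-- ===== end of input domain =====

-- ===== PORT A =====
-- B differs from A only by flattening the nested splits into one character scan; same output.
-- shared transliteration of the (identical) strip chain line of both Pythons
def pvStripChain (x : String) : String :=
  PySem.Str.stripChars (PySem.Str.stripChars (PySem.Str.stripChars (PySem.Str.stripChars
    (PySem.Str.stripChars (PySem.Str.stripChars (PySem.Str.stripChars (PySem.Str.stripChars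
      (PySem.Str.stripChars (PySem.Str.stripChars x ".") ":") "?") "/") "'") "©") "»") "/") " ") ","

-- x.split(sep) for a non-empty literal sep: PySem.Str.split? is `some` there, getD is never taken
def pySplit (s sep : String) : List String := (PySem.Str.split? s sep).getD []

def Clean_NoSyn (No_syn : List String) : List String :=
  No_syn.foldl (fun Words x =>
    let x := pvStripChain x
    (pySplit x ".").foldl (fun Words n =>
      (pySplit n "-").foldl (fun Words k =>
        (pySplit k "/").foldl (fun Words m =>
          if m ∉ (["©", "»", "/", " "] : List String) ∧ PySem.Str.len m > 1 ∧
              PySem.Str.strIsalpha m = true then Words ++ [m] else Words) Words) Words) Words) []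

-- ===== PORT B =====
-- cur is tracked as List Char (exact for B's one-character string concatenations)
def Clean_NoSyn_alt (No_syn : List String) : List String :=
  No_syn.foldl (fun Words x =>
    let x := pvStripChain x
    let r := x.toList.foldl (fun (s : List String × List Char) ch =>
      if ch = '.' ∨ ch = '-' ∨ ch = '/' then
        (if s.2.length > 1 ∧ PySem.Chars.strIsalpha s.2 = true
         then s.1 ++ [String.ofList s.2] else s.1, [])
      else (s.1, s.2 ++ [ch])) (Words, ([] : List Char))
    if r.2.length > 1 ∧ PySem.Chars.strIsalpha r.2 = true
    then r.1 ++ [String.ofList r.2] else r.1) []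

-- ===== PRECONDITION & SPEC =====
def Spec_Clean_NoSyn (No_syn : List String) (out : List String) : Prop := out = Clean_NoSyn_alt No_syn
instance (No_syn : List String) (out : List String) : Decidable (Spec_Clean_NoSyn No_syn out) := by unfold Spec_Clean_NoSyn; infer_instance

-- ===== CLAIM (what is proved, stated in full; the proofs are below) =====
def Claim_equal_Clean_NoSyn : Prop := ∀ (No_syn : List String), Dom_Clean_NoSyn No_syn → Spec_Clean_NoSyn No_syn (Clean_NoSyn No_syn)

-- ===== LEMMAS AND PROOFS =====

def pvFrags (cs : List Char) : List Char → List (List Char)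
  | [] => [[]]
  | a :: t => if a ∈ cs then [] :: pvFrags cs t else (pvFrags cs t).modifyHead (a :: ·)

lemma pvFrags_cons_shape (cs l : List Char) : ∃ h t, pvFrags cs l = h :: t := by
  induction l with
  | nil => exact ⟨[], [], rfl⟩
  | cons a t ih =>
    obtain ⟨h, t', e⟩ := ih
    by_cases hm : a ∈ cs
    · exact ⟨[], pvFrags cs t, by simp [pvFrags, hm]⟩
    · exact ⟨a :: h, t', by simp [pvFrags, hm, e]⟩

lemma go_single (c : Char) (fuel : Nat) :
    ∀ (l cur : List Char) (acc : List (List Char)), l.length ≤ fuel →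
    PySem.Chars.splitOn.go [c] fuel l cur acc
      = acc.reverse ++ (pvFrags [c] l).modifyHead (cur.reverse ++ ·) := by
  induction fuel with
  | zero =>
    intro l cur acc h
    have hl : l = [] := List.eq_nil_of_length_eq_zero (Nat.le_zero.mp h)
    subst hl
    rw [PySem.Chars.splitOn.go.eq_def]
    simp [pvFrags]
  | succ fuel ih =>
    intro l cur acc h
    cases l with
    | nil =>
      rw [PySem.Chars.splitOn.go.eq_def]
      simp [pvFrags]
    | cons a rest =>
      obtain ⟨h0, t0, e0⟩ := pvFrags_cons_shape [c] rest
      rw [PySem.Chars.splitOn.go.eq_def]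
      by_cases hac : c = a
      · subst hac
        simp only [List.isPrefixOf, Bool.and_true, beq_self_eq_true, if_pos, List.length_cons] at *
        rw [show List.drop ((List.nil (α := Char)).length + 1) (c :: rest) = rest from rfl,
          ih rest [] (cur.reverse :: acc) (by omega)]
        simp [pvFrags, e0]
      · have hpre : ([c].isPrefixOf (a :: rest)) = false := by
          simp [List.isPrefixOf]; exact fun h' => absurd h' hac
        simp only [hpre, Bool.false_eq_true, if_false]
        rw [ih rest (a :: cur) acc (by simpa using Nat.le_of_succ_le_succ h)]
        have hmem : a ∉ [c] := by simpa using fun h' => hac h'.symm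
        simp [pvFrags, hmem, e0]

lemma splitOn_single (c : Char) (l : List Char) :
    PySem.Chars.splitOn l [c] = pvFrags [c] l := by
  rw [PySem.Chars.splitOn, go_single c (l.length + 1) l [] [] (by omega)]
  obtain ⟨h0, t0, e0⟩ := pvFrags_cons_shape [c] l
  simp [e0]

lemma pySplit_char (s sep : String) (c : Char) (hsep : sep.toList = [c]) :
    pySplit s sep = (pvFrags [c] s.toList).map String.ofList := by
  rw [pySplit, PySem.Str.split?, PySem.Chars.split?, hsep]
  simp [splitOn_single]

lemma pvFrags_flatMap (c : Char) (cs : List Char) (l : List Char) :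
    (pvFrags [c] l).flatMap (pvFrags cs) = pvFrags (c :: cs) l := by
  induction l with
  | nil => simp [pvFrags]
  | cons a t ih =>
    by_cases hac : a = c
    · subst hac
      simp [pvFrags, ← ih]
    · obtain ⟨h0, t0, e0⟩ := pvFrags_cons_shape [c] t
      rw [e0] at ih
      by_cases hcs : a ∈ cs
      · obtain ⟨h1, t1, e1⟩ := pvFrags_cons_shape cs h0
        simp [pvFrags, hac, hcs, e0, e1] at ih ⊢
        rw [← ih]
      · obtain ⟨h1, t1, e1⟩ := pvFrags_cons_shape cs h0
        obtain ⟨h2, t2, e2⟩ := pvFrags_cons_shape (c :: cs) t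
        simp [pvFrags, hac, hcs, e0, e1, e2] at ih ⊢
        rw [← ih.1, ← ih.2]
        exact ⟨rfl, rfl⟩

def pvKeep (cs : List Char) : Bool :=
  decide (cs.length > 1 ∧ PySem.Chars.strIsalpha cs = true)

def pvOut (fs : List (List Char)) : List String := (fs.filter pvKeep).map String.ofList

lemma pvKeep_ofList (cs : List Char) :
    decide (String.ofList cs ∉ (["©", "»", "/", " "] : List String) ∧
      PySem.Str.len (String.ofList cs) > 1 ∧ PySem.Str.strIsalpha (String.ofList cs) = true)
    = pvKeep cs := by
  rw [pvKeep]
  apply decide_eq_decide.mpr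
  constructor
  · rintro ⟨-, h2, h3⟩
    refine ⟨?_, by simpa [PySem.Str.strIsalpha] using h3⟩
    simpa [PySem.Str.len] using h2
  · rintro ⟨h2, h3⟩
    refine ⟨?_, by simpa [PySem.Str.len] using h2, by simpa [PySem.Str.strIsalpha]⟩
    intro hm
    have hl : cs.length = 1 := by
      rcases (by simpa using hm : _ ∨ _ ∨ _ ∨ _) with h | h | h | h <;>
        · have := congrArg String.toList h
          simp at this
          simp [this]
    omega

lemma A_line (Words : List String) (x : String) :
    (pySplit x ".").foldl (fun Words n =>
      (pySplit n "-").foldl (fun Words k =>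
        (pySplit k "/").foldl (fun Words m =>
          if m ∉ (["©", "»", "/", " "] : List String) ∧ PySem.Str.len m > 1 ∧
              PySem.Str.strIsalpha m = true then Words ++ [m] else Words) Words) Words) Words
    = Words ++ pvOut (pvFrags ['.', '-', '/'] x.toList) := by
  simp only [PySem.List.foldl_append_ite_eq_filter, PySem.List.foldl_append_eq_flatMap]
  rw [pySplit_char x "." '.' rfl]
  simp only [List.flatMap_map, Function.comp_def, pySplit_char _ "-" '-' rfl,
    String.toList_ofList, List.flatMap_map, pySplit_char _ "/" '/' rfl,
    List.filter_map, pvKeep_ofList]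
  have inner : ∀ nl : List Char,
      List.flatMap (fun a => List.map String.ofList (List.filter (fun x => pvKeep x) (pvFrags ['/'] a)))
        (pvFrags ['-'] nl)
      = List.map String.ofList (List.filter (fun x => pvKeep x) (pvFrags ['-', '/'] nl)) := by
    intro nl
    rw [← pvFrags_flatMap '-' ['/'] nl, List.filter_flatMap, List.map_flatMap]
  simp only [inner, pvOut, ← pvFrags_flatMap '.' ['-', '/'] x.toList,
    List.filter_flatMap, List.map_flatMap]

lemma B_scan (l : List Char) : ∀ (Words : List String) (cur : List Char),
    (let r := l.foldl (fun (s : List String × List Char) ch =>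
      if ch = '.' ∨ ch = '-' ∨ ch = '/' then
        (if s.2.length > 1 ∧ PySem.Chars.strIsalpha s.2 = true
         then s.1 ++ [String.ofList s.2] else s.1, [])
      else (s.1, s.2 ++ [ch])) (Words, cur)
     if r.2.length > 1 ∧ PySem.Chars.strIsalpha r.2 = true
     then r.1 ++ [String.ofList r.2] else r.1)
    = Words ++ pvOut ((pvFrags ['.', '-', '/'] l).modifyHead (cur ++ ·)) := by
  induction l with
  | nil =>
    intro Words cur
    simp only [List.foldl_nil, pvFrags, List.modifyHead, pvOut, List.filter, pvKeep]
    by_cases hk : cur.length > 1 ∧ PySem.Chars.strIsalpha cur = true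
    · simp [hk]
    · simp [hk]
  | cons ch rest ih =>
    intro Words cur
    by_cases hs : ch = '.' ∨ ch = '-' ∨ ch = '/'
    · simp only [List.foldl_cons, if_pos hs]
      rw [ih]
      have hmem : ch ∈ ['.', '-', '/'] := by rcases hs with h | h | h <;> simp [h]
      obtain ⟨h0, t0, e0⟩ := pvFrags_cons_shape ['.', '-', '/'] rest
      by_cases hk : cur.length > 1 ∧ PySem.Chars.strIsalpha cur = true
      · simp [pvFrags, hmem, e0, pvOut, pvKeep, List.filter, hk]
      · simp [pvFrags, hmem, e0, pvOut, pvKeep, List.filter, hk]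
    · simp only [List.foldl_cons, if_neg hs]
      rw [ih]
      have hmem : ch ∉ ['.', '-', '/'] := by simpa using hs
      obtain ⟨h0, t0, e0⟩ := pvFrags_cons_shape ['.', '-', '/'] rest
      simp [pvFrags, hmem, e0]

-- ===== VERDICT (by name: the statement is the Claim_ definition above) =====
theorem Clean_NoSyn_spec : Claim_equal_Clean_NoSyn := by
  intro No_syn _
  unfold Spec_Clean_NoSyn Clean_NoSyn Clean_NoSyn_alt
  apply PySem.List.foldl_congr_mem
  intro Words x _
  simp only []
  rw [A_line Words (pvStripChain x), B_scan (pvStripChain x).toList Words []]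
  obtain ⟨h0, t0, e0⟩ := pvFrags_cons_shape ['.', '-', '/'] (pvStripChain x).toList
  simp [e0]
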